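-- pv_equiv track=rewrite | github.com/rolewj/steganography | lab5/rs_analysis.py | get_variation
-- ===== SOURCE A (Python) =====
-- def get_red(pixel: int) -> int:
--     return (pixel >> 16) & 0xff
--
-- def get_pixel_colour(pixel: int, colour: int) -> int:
--     return get_red(pixel)
--
-- def get_variation(block: list[int], colour: int) -> float:
--     var = 0
--     for i in range(0, len(block), 4):
--         if i + 3 < len(block):
--             c0 = get_pixel_colour(block[i], colour)
--             c1 = get_pixel_colour(block[i+1], colour)
--             c2 = get_pixel_colour(block[i+2], colour)
--             c3 = get_pixel_colour(block[i+3], colour)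
--             var += abs(c0 - c1)
--             var += abs(c3 - c2)
--             var += abs(c1 - c3)
--             var += abs(c2 - c0)
--     return var
-- ===== SOURCE B (Python) =====
-- def get_red(pixel: int) -> int:
--     return (pixel >> 16) & 0xff
--
-- def get_pixel_colour(pixel: int, colour: int) -> int:
--     return get_red(pixel)
--
-- def get_variation(block: list[int], colour: int) -> float:
--     # Staged column-wise computation: extract all colours once (truncated to
--     # whole 4-pixel blocks), split them into the four block columns, then sum
--     # each of the four edge classes (0-1, 3-2, 1-3, 2-0) in its own pass.
--     m = len(block) // 4 * 4
--     cs = [get_pixel_colour(p, colour) for p in block[:m]]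
--     e0, e1, e2, e3 = cs[0::4], cs[1::4], cs[2::4], cs[3::4]
--     def edge(xs, ys):
--         return sum(abs(x - y) for x, y in zip(xs, ys))
--     return edge(e0, e1) + edge(e3, e2) + edge(e1, e3) + edge(e2, e0)
-- ===== Notes on version B (the rewrite author's own statement) =====
-- stated objective: alternative
-- what changed: Instead of one indexed loop over 4-pixel blocks computing four differences per block, B extracts the colour of every pixel once (truncated to whole blocks), splits the colours into the four block columns by stride, and sums each of the four edge classes (0-1, 3-2, 1-3, 2-0) in its own column-wise pass.
import Mathlib
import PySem

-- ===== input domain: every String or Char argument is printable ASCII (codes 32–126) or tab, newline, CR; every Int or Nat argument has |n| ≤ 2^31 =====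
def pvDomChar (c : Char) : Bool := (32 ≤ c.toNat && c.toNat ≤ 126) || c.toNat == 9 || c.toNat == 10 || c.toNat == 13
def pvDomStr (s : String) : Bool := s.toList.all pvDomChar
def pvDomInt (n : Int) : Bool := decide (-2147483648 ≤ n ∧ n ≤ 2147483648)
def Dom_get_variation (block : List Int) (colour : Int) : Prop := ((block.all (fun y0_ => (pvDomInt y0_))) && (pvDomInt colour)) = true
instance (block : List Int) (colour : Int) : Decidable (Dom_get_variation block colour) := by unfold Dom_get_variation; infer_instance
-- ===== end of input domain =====

-- B replaces A's single indexed per-block loop by staged column-wise passes: colours extracted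
-- once, block columns split by stride, each of the four edge classes summed separately; same cost.


-- ===== PORT A =====
def get_red (pixel : Int) : Int := PySem.Int.band (pixel >>> (16 : Nat)) 0xff

def get_pixel_colour (pixel : Int) (colour : Int) : Int := get_red pixel

-- the body of A's for-loop, one iteration at index i
def stepA (block : List Int) (colour : Int) (var : Int) (i : Int) : Int :=
  if i + 3 < (block.length : Int) then
    let c0 := get_pixel_colour (PySem.List.pyGetD block i 0) colour
    let c1 := get_pixel_colour (PySem.List.pyGetD block (i + 1) 0) colour
    let c2 := get_pixel_colour (PySem.List.pyGetD block (i + 2) 0) colour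
    let c3 := get_pixel_colour (PySem.List.pyGetD block (i + 3) 0) colour
    var + |c0 - c1| + |c3 - c2| + |c1 - c3| + |c2 - c0|
  else var

def get_variation (block : List Int) (colour : Int) : Int :=
  (PySem.List.pyRange 0 (block.length : Int) 4).foldl (stepA block colour) 0

-- ===== PORT B =====
-- the slice cs[k::4] of Source B, applied to cs.drop k: every 4th element (exact for
-- a nonnegative start and step 4)
def every4th : List Int → List Int
  | a :: _ :: _ :: _ :: rest => a :: every4th rest
  | a :: _ => [a]
  | [] => []

-- edge(xs, ys) of Source B: sum(abs(x - y) for x, y in zip(xs, ys))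
def pyEdge (xs ys : List Int) : Int := ((xs.zip ys).map (fun p => |p.1 - p.2|)).sum

def get_variation_alt (block : List Int) (colour : Int) : Int :=
  let m : Nat := block.length / 4 * 4   -- len(block) // 4 * 4 (nonneg, so Nat division is Python's //)
  let cs := (block.take m).map (fun p => get_pixel_colour p colour)
  let e0 := every4th cs
  let e1 := every4th (cs.drop 1)
  let e2 := every4th (cs.drop 2)
  let e3 := every4th (cs.drop 3)
  pyEdge e0 e1 + pyEdge e3 e2 + pyEdge e1 e3 + pyEdge e2 e0

-- ===== PRECONDITION & SPEC =====
def Spec_get_variation (block : List Int) (colour : Int) (out : Int) : Prop := out = get_variation_alt block colour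
instance (block : List Int) (colour : Int) (out : Int) : Decidable (Spec_get_variation block colour out) := by unfold Spec_get_variation; infer_instance

-- ===== CLAIM (what is proved, stated in full; the proofs are below) =====
def Claim_equal_get_variation : Prop := ∀ (block : List Int) (colour : Int), Dom_get_variation block colour → Spec_get_variation block colour (get_variation block colour)

-- ===== LEMMAS AND PROOFS =====

-- proof helper: A's loop with an explicit accumulator, consuming four pixels at a time
def altLoop (colour : Int) : List Int → Int → Int
  | p0 :: p1 :: p2 :: p3 :: rest, total =>
      let c0 := get_pixel_colour p0 colour
      let c1 := get_pixel_colour p1 colour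
      let c2 := get_pixel_colour p2 colour
      let c3 := get_pixel_colour p3 colour
      altLoop colour rest (total + (|c0 - c1| + |c3 - c2| + |c1 - c3| + |c2 - c0|))
  | _, total => total

-- shifting an index past one cons
theorem pyGetD_cons_shift (a : Int) (l : List Int) (i d : Int) (hi : 0 ≤ i) :
    PySem.List.pyGetD (a :: l) (i + 1) d = PySem.List.pyGetD l i d := by
  rw [PySem.List.pyGetD_of_nonneg _ _ (by omega), PySem.List.pyGetD_of_nonneg _ _ hi]
  have : (i + 1).toNat = i.toNat + 1 := by omega
  simp [this]

theorem pyGetD_cons4_shift (p0 p1 p2 p3 : Int) (l : List Int) (i d : Int) (hi : 0 ≤ i) :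
    PySem.List.pyGetD (p0 :: p1 :: p2 :: p3 :: l) (i + 4) d = PySem.List.pyGetD l i d := by
  have e1 := pyGetD_cons_shift p0 (p1 :: p2 :: p3 :: l) (i + 3) d (by omega)
  have e2 := pyGetD_cons_shift p1 (p2 :: p3 :: l) (i + 2) d (by omega)
  have e3 := pyGetD_cons_shift p2 (p3 :: l) (i + 1) d (by omega)
  have e4 := pyGetD_cons_shift p3 l i d hi
  have h4 : i + 4 = (i + 3) + 1 := by ring
  rw [h4, e1]
  have h3 : i + 3 = (i + 2) + 1 := by ring
  rw [h3, e2]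
  have h2 : i + 2 = (i + 1) + 1 := by ring
  rw [h2, e3, e4]

-- stepA over a 4-longer list, at an index shifted by 4, is stepA over the tail
theorem stepA_shift (p0 p1 p2 p3 : Int) (rest : List Int) (colour acc i : Int) (hi : 0 ≤ i) :
    stepA (p0 :: p1 :: p2 :: p3 :: rest) colour acc (i + 4) = stepA rest colour acc i := by
  unfold stepA
  have hlen : ((p0 :: p1 :: p2 :: p3 :: rest).length : Int) = (rest.length : Int) + 4 := by
    simp; omega
  have hguard : (i + 4 + 3 < ((p0 :: p1 :: p2 :: p3 :: rest).length : Int)) ↔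
      (i + 3 < (rest.length : Int)) := by rw [hlen]; omega
  rw [if_congr hguard ?_ rfl]
  have g0 := pyGetD_cons4_shift p0 p1 p2 p3 rest i 0 hi
  have g1 := pyGetD_cons4_shift p0 p1 p2 p3 rest (i + 1) 0 (by omega)
  have g2 := pyGetD_cons4_shift p0 p1 p2 p3 rest (i + 2) 0 (by omega)
  have g3 := pyGetD_cons4_shift p0 p1 p2 p3 rest (i + 3) 0 (by omega)
  have a1 : i + 4 + 1 = (i + 1) + 4 := by ring
  have a2 : i + 4 + 2 = (i + 2) + 4 := by ring
  have a3 : i + 4 + 3 = (i + 3) + 4 := by ring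
  rw [a1, a2, a3, g0, g1, g2, g3]

-- A's whole loop equals altLoop, for any accumulator
theorem loop_eq (colour : Int) : ∀ (xs : List Int) (acc : Int),
    (PySem.List.pyRange 0 (xs.length : Int) 4).foldl (stepA xs colour) acc = altLoop colour xs acc
  | [], acc => by simp [PySem.List.pyRange_of_pos 0 _ (by norm_num : (0:Int) < 4), altLoop]
  | [a], acc => by
      rw [PySem.List.pyRange_of_pos 0 _ (by norm_num : (0:Int) < 4)]
      norm_num [altLoop, stepA]
  | [a, b], acc => by
      rw [PySem.List.pyRange_of_pos 0 _ (by norm_num : (0:Int) < 4)]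
      norm_num [altLoop, stepA]
  | [a, b, c], acc => by
      rw [PySem.List.pyRange_of_pos 0 _ (by norm_num : (0:Int) < 4)]
      norm_num [altLoop, stepA]
  | p0 :: p1 :: p2 :: p3 :: rest, acc => by
      have hn : ((p0 :: p1 :: p2 :: p3 :: rest).length : Int) = (rest.length : Int) + 4 := by
        simp; omega
      have hm : (((rest.length : Int) + 4 - 0 + 4 - 1) / 4).toNat
          = (if 0 < (rest.length : Int) then (((rest.length : Int) - 0 + 4 - 1) / 4).toNat else 0) + 1 := by
        split_ifs with h
        · omega
        · omega
      rw [PySem.List.pyRange_of_pos 0 _ (by norm_num : (0:Int) < 4), hn,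
          if_pos (by omega : (0:Int) < (rest.length : Int) + 4), hm,
          List.range_succ_eq_map, List.map_cons, List.foldl_cons, List.map_map, List.foldl_map]
      have hstep : ∀ (b : Int), ∀ x ∈ List.range (if 0 < (rest.length : Int) then (((rest.length : Int) - 0 + 4 - 1) / 4).toNat else 0),
          stepA (p0 :: p1 :: p2 :: p3 :: rest) colour b (((fun k : Nat => 0 + 4 * (k : Int)) ∘ Nat.succ) x)
            = stepA rest colour b (0 + 4 * (x : Int)) := by
        intro b x _
        have : ((fun k : Nat => 0 + 4 * (k : Int)) ∘ Nat.succ) x = (0 + 4 * (x : Int)) + 4 := by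
          simp [Function.comp]; ring
        rw [this, stepA_shift _ _ _ _ _ _ _ _ (by positivity)]
      have hc := PySem.List.foldl_congr_mem
        (List.range (if 0 < (rest.length : Int) then (((rest.length : Int) - 0 + 4 - 1) / 4).toNat else 0))
        (fun b x => stepA (p0 :: p1 :: p2 :: p3 :: rest) colour b (((fun k : Nat => 0 + 4 * (k : Int)) ∘ Nat.succ) x))
        (fun b x => stepA rest colour b (0 + 4 * (x : Int)))
        (stepA (p0 :: p1 :: p2 :: p3 :: rest) colour acc (0 + 4 * ((0 : Nat) : Int))) hstep
      rw [hc]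
      have hfirst : stepA (p0 :: p1 :: p2 :: p3 :: rest) colour acc (0 + 4 * ((0 : Nat) : Int))
          = acc + (|get_pixel_colour p0 colour - get_pixel_colour p1 colour|
              + |get_pixel_colour p3 colour - get_pixel_colour p2 colour|
              + |get_pixel_colour p1 colour - get_pixel_colour p3 colour|
              + |get_pixel_colour p2 colour - get_pixel_colour p0 colour|) := by
        unfold stepA
        rw [if_pos (by rw [hn]; push_cast; omega)]
        norm_num [PySem.List.pyGetD_of_nonneg,
          show ((2:Int)).toNat = 2 from rfl, show ((3:Int)).toNat = 3 from rfl]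
        ring
      rw [hfirst]
      have hIH := loop_eq colour rest
        (acc + (|get_pixel_colour p0 colour - get_pixel_colour p1 colour|
              + |get_pixel_colour p3 colour - get_pixel_colour p2 colour|
              + |get_pixel_colour p1 colour - get_pixel_colour p3 colour|
              + |get_pixel_colour p2 colour - get_pixel_colour p0 colour|))
      rw [PySem.List.pyRange_of_pos 0 _ (by norm_num : (0:Int) < 4)] at hIH
      rw [← List.foldl_map, hIH, altLoop]
termination_by xs => xs.length

-- the four stride slices, pushed past one block of four
theorem every4th_drop1 (b c d : Int) (l : List Int) :
    every4th (b :: c :: d :: l) = b :: every4th (l.drop 1) := by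
  cases l <;> rfl

theorem every4th_drop2 (c d : Int) (l : List Int) :
    every4th (c :: d :: l) = c :: every4th (l.drop 2) := by
  cases l with
  | nil => rfl
  | cons x l => cases l <;> rfl

theorem every4th_drop3 (d : Int) (l : List Int) :
    every4th (d :: l) = d :: every4th (l.drop 3) := by
  cases l with
  | nil => rfl
  | cons x l =>
    cases l with
    | nil => rfl
    | cons y l => cases l <;> rfl

-- pyEdge over a cons on both sides
theorem pyEdge_cons (x y : Int) (xs ys : List Int) :
    pyEdge (x :: xs) (y :: ys) = |x - y| + pyEdge xs ys := by
  simp [pyEdge]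

-- B's value over one whole block of four plus the rest
theorem alt_chunk (p0 p1 p2 p3 : Int) (rest : List Int) (colour : Int) :
    get_variation_alt (p0 :: p1 :: p2 :: p3 :: rest) colour
      = (|get_pixel_colour p0 colour - get_pixel_colour p1 colour|
          + |get_pixel_colour p3 colour - get_pixel_colour p2 colour|
          + |get_pixel_colour p1 colour - get_pixel_colour p3 colour|
          + |get_pixel_colour p2 colour - get_pixel_colour p0 colour|)
        + get_variation_alt rest colour := by
  unfold get_variation_alt
  dsimp only
  have hm : (p0 :: p1 :: p2 :: p3 :: rest).length / 4 * 4 = 4 + rest.length / 4 * 4 := by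
    simp [List.length_cons]; omega
  rw [hm]
  have htake : (p0 :: p1 :: p2 :: p3 :: rest).take (4 + rest.length / 4 * 4)
      = p0 :: p1 :: p2 :: p3 :: rest.take (rest.length / 4 * 4) := by
    rw [Nat.add_comm]; rfl
  rw [htake]
  simp only [List.map_cons, List.drop]
  rw [show every4th (get_pixel_colour p0 colour :: get_pixel_colour p1 colour ::
        get_pixel_colour p2 colour :: get_pixel_colour p3 colour ::
        (rest.take (rest.length / 4 * 4)).map (fun p => get_pixel_colour p colour))
      = get_pixel_colour p0 colour :: every4th ((rest.take (rest.length / 4 * 4)).map (fun p => get_pixel_colour p colour)) from rfl,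
    every4th_drop1, every4th_drop2, every4th_drop3]
  rw [pyEdge_cons, pyEdge_cons, pyEdge_cons, pyEdge_cons]
  ring

theorem altLoop_eq_alt (colour : Int) : ∀ (xs : List Int) (acc : Int),
    altLoop colour xs acc = acc + get_variation_alt xs colour
  | [], acc => by simp [altLoop, get_variation_alt, every4th, pyEdge]
  | [a], acc => by simp [altLoop, get_variation_alt, every4th, pyEdge]
  | [a, b], acc => by simp [altLoop, get_variation_alt, every4th, pyEdge]
  | [a, b, c], acc => by simp [altLoop, get_variation_alt, every4th, pyEdge]
  | p0 :: p1 :: p2 :: p3 :: rest, acc => by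
      rw [altLoop, altLoop_eq_alt colour rest, alt_chunk]
      ring
termination_by xs => xs.length

-- ===== VERDICT (by name: the statement is the Claim_ definition above) =====
theorem get_variation_spec : Claim_equal_get_variation := by
  intro block colour _
  unfold Spec_get_variation get_variation
  rw [loop_eq, altLoop_eq_alt]
  ring
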